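-- pv_equiv track=rewrite | github.com/Meiiosei/Nim | Nim_variante_part3_Naumova_Silva.py | ligne_a_modifier
-- ===== SOURCE A (Python) =====
-- def bin_to_int(bit):
-- 	"""
-- 	Transforme une valeur en base 2 en valeur base 10 soit un nombre entier.
--
-- 	Args :
-- 		bit(str) : Valeur binaire.
--
-- 	Return :
-- 		(int) : La valeur en base 10 correspondant.
-- 	"""
-- 	n = 0
-- 	tour = 0
-- 	for i in range(len(bit) - 1, -1, -1):
-- 		if bit[i] == '1':
-- 			n = n + 2**tour
-- 		tour = tour + 1
-- 	return n
--
-- def ligne_a_modifier(tableau):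
-- 	"""
-- 	Permet de Donner la première occurence de la valeur la plus élévé
-- 	des valeurs bianires présente dans un tableau.
--
-- 	Args :
--
-- 		tableau(list) : Tableau de valeur binaire
--
-- 	Return :
-- 		(int) : indice de la valeur recherchée
-- 	"""
-- 	verif = 0
-- 	indice = 0
-- 	for i in range(len(tableau)):
-- 		if verif < bin_to_int(tableau[i]):
-- 			verif = bin_to_int(tableau[i])
-- 			indice = i
--
-- 	return indice
-- ===== SOURCE B (Python) =====
-- def bin_to_int(bit):
-- 	"""
-- 	Transforme une valeur en base 2 en valeur base 10 soit un nombre entier.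
-- 	"""
-- 	n = 0
-- 	tour = 0
-- 	for i in range(len(bit) - 1, -1, -1):
-- 		if bit[i] == '1':
-- 			n = n + 2**tour
-- 		tour = tour + 1
-- 	return n
--
-- def ligne_a_modifier(tableau):
-- 	"""
-- 	Indice de la premiere occurrence de la plus grande valeur binaire du tableau.
-- 	"""
-- 	if not tableau:
-- 		return 0
-- 	vals = [bin_to_int(b) for b in tableau]
-- 	return vals.index(max(vals))
-- ===== Notes on version B (the rewrite author's own statement) =====
-- stated objective: simpler
-- what changed: Replaces A's fused strict-improvement argmax scan (running verif/indice state) with two separately-shaped passes: build the decoded values once, take max(vals), then locate its first index with list.index; empty input keeps A's 0 via a guard.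
import Mathlib
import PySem

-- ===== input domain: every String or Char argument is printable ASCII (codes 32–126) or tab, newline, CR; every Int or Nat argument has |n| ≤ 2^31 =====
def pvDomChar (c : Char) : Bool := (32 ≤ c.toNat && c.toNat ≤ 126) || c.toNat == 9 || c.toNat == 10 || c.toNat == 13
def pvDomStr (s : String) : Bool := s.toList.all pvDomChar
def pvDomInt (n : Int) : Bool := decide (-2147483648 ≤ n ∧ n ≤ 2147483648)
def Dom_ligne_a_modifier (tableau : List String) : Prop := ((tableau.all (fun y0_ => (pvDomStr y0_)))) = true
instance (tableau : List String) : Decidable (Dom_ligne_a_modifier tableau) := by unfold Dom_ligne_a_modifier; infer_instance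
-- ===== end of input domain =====

-- B replaces A's fused argmax scan by two passes (max, then first index); same result, simpler shape.

-- ===== PORT A =====
-- shared helper (identical in Source A and Source B): decode a binary string, scanning right to left
def bin_to_int (bit : String) : Int :=
  ((PySem.List.pyRange (PySem.Str.len bit - 1) (-1) (-1)).foldl
    (fun (st : Int × Nat) i =>
      if PySem.Str.pyGet? bit i = some '1' then (st.1 + 2 ^ st.2, st.2 + 1)
      else (st.1, st.2 + 1))
    (0, 0)).1

def ligne_a_modifier (tableau : List String) : Int :=
  ((PySem.List.pyRange 0 (PySem.List.len tableau) 1).foldl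
    (fun (st : Int × Int) i =>
      let v := bin_to_int (PySem.List.pyGetD tableau i "")
      if st.1 < v then (v, i) else st)
    (0, 0)).2

-- ===== PORT B =====
def ligne_a_modifier_alt (tableau : List String) : Int :=
  if tableau = [] then 0
  else
    let vals := tableau.map bin_to_int
    match PySem.List.max? vals (fun y => y) with
    | some m =>
        match PySem.List.index? vals m with
        | some j => (j : Int)
        | none => 0       -- unreachable: max is a member (Python .index would raise)
    | none => 0           -- unreachable: vals is nonempty

-- ===== PRECONDITION & SPEC =====
def Spec_ligne_a_modifier (tableau : List String) (out : Int) : Prop := out = ligne_a_modifier_alt tableau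
instance (tableau : List String) (out : Int) : Decidable (Spec_ligne_a_modifier tableau out) := by unfold Spec_ligne_a_modifier; infer_instance

-- ===== CLAIM (what is proved, stated in full; the proofs are below) =====
def Claim_equal_ligne_a_modifier : Prop := ∀ (tableau : List String), Dom_ligne_a_modifier tableau → Spec_ligne_a_modifier tableau (ligne_a_modifier tableau)

-- ===== LEMMAS AND PROOFS =====

-- abstract form of A's scan on the decoded values, with explicit running index
def auxScan : List Int → Int → Int → Int → Int × Int
  | [], _, verif, indice => (verif, indice)
  | v :: t, s, verif, indice =>
      if verif < v then auxScan t (s + 1) v s else auxScan t (s + 1) verif indice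

-- first index of m in l (total; callers supply m ∈ l)
def firstIdx : List Int → Int → Nat
  | [], _ => 0
  | x :: l, m => if x = m then 0 else firstIdx l m + 1

theorem index?_eq_firstIdx (l : List Int) (m : Int) (h : m ∈ l) :
    PySem.List.index? l m = some (firstIdx l m) := by
  induction l with
  | nil => cases h
  | cons x u ih =>
      by_cases hx : x = m
      · subst hx
        rw [PySem.List.index?_cons_self]
        simp [firstIdx]
      · have hm : m ∈ u := by
          rcases List.mem_cons.mp h with h' | h'
          · exact absurd h'.symm hx
          · exact h'
        rw [PySem.List.index?_cons_of_ne u hx, ih hm]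
        simp [firstIdx, hx]

theorem foldl_max_mem (u : List Int) (y : Int) : u.foldl max y ∈ y :: u := by
  induction u generalizing y with
  | nil => simp
  | cons a l ih =>
      simp only [List.foldl_cons]
      rcases List.mem_cons.mp (ih (max y a)) with h | h
      · rw [h]
        rcases max_choice y a with hc | hc <;> simp [hc]
      · simp [h]

theorem bin_to_int_nonneg_aux (bit : String) (l : List Int) (st : Int × Nat) (h : 0 ≤ st.1) :
    0 ≤ (l.foldl (fun (st : Int × Nat) i =>
      if PySem.Str.pyGet? bit i = some '1' then (st.1 + 2 ^ st.2, st.2 + 1)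
      else (st.1, st.2 + 1)) st).1 := by
  induction l generalizing st with
  | nil => exact h
  | cons x xs ih =>
      simp only [List.foldl_cons]
      split <;> exact ih _ (by simp at h ⊢; positivity)

theorem bin_to_int_nonneg (bit : String) : 0 ≤ bin_to_int bit := by
  unfold bin_to_int
  exact bin_to_int_nonneg_aux bit _ _ le_rfl

theorem enumerate_map {α β : Type} (f : α → β) (xs : List α) (s : Int) :
    PySem.List.enumerate (xs.map f) s = (PySem.List.enumerate xs s).map (fun p => (p.1, f p.2)) := by
  induction xs generalizing s with
  | nil => simp [PySem.List.enumerate_nil]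
  | cons x t ih => simp [PySem.List.enumerate_cons, ih]

theorem foldl_enumerate_eq_auxScan (vals : List Int) (s verif indice : Int) :
    (PySem.List.enumerate vals s).foldl
      (fun (st : Int × Int) p => if st.1 < p.2 then (p.2, p.1) else st) (verif, indice)
    = auxScan vals s verif indice := by
  induction vals generalizing s verif indice with
  | nil => simp [PySem.List.enumerate_nil, auxScan]
  | cons v t ih =>
      simp only [PySem.List.enumerate_cons, List.foldl_cons, auxScan]
      split <;> exact ih _ _ _

theorem auxScan_spec (t : List Int) (v s verif indice : Int) :
    (auxScan (v :: t) s verif indice).2 =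
      if verif < t.foldl max v then s + ((firstIdx (v :: t) (t.foldl max v) : Nat) : Int)
      else indice := by
  induction t generalizing v s verif indice with
  | nil =>
      simp only [auxScan, List.foldl_nil, firstIdx, if_pos]
      split <;> simp
  | cons x u ih =>
      have hm : (x :: u).foldl max v = max v (u.foldl max x) := by
        simp only [List.foldl_cons]
        exact List.foldl_assoc
      rw [show auxScan (v :: x :: u) s verif indice
            = if verif < v then auxScan (x :: u) (s + 1) v s
              else auxScan (x :: u) (s + 1) verif indice from rfl]
      split
      · -- verif < v
        rename_i h1
        rw [ih x (s + 1) v s, hm]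
        by_cases h2 : v < u.foldl max x
        · rw [max_eq_right (le_of_lt h2)]
          have hfi : firstIdx (v :: x :: u) (u.foldl max x)
              = firstIdx (x :: u) (u.foldl max x) + 1 := by
            simp only [firstIdx]
            rw [if_neg (by omega)]
          rw [if_pos (by omega), if_pos (by omega), hfi]
          push_cast
          omega
        · rw [max_eq_left (by omega)]
          rw [if_neg (by omega), if_pos h1]
          simp [firstIdx]
      · -- ¬ verif < v
        rename_i h1
        rw [ih x (s + 1) verif indice, hm]
        by_cases h2 : verif < u.foldl max x
        · rw [max_eq_right (by omega)]
          have hfi : firstIdx (v :: x :: u) (u.foldl max x)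
              = firstIdx (x :: u) (u.foldl max x) + 1 := by
            simp only [firstIdx]
            rw [if_neg (by omega)]
          rw [if_pos h2, if_pos h2, hfi]
          push_cast
          omega
        · rw [if_neg h2, if_neg (by omega)]

theorem ligne_a_eq_auxScan (tableau : List String) :
    ligne_a_modifier tableau = (auxScan (tableau.map bin_to_int) 0 0 0).2 := by
  unfold ligne_a_modifier
  rw [← foldl_enumerate_eq_auxScan]
  congr 1
  rw [enumerate_map, PySem.List.enumerate_eq_map_pyRange tableau "", List.map_map,
    List.foldl_map]
  rfl

theorem foldl_max_nonneg (u : List Int) (x : Int) (hx : 0 ≤ x) : 0 ≤ u.foldl max x := by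
  induction u generalizing x with
  | nil => exact hx
  | cons a t ih => exact ih _ (le_trans hx (le_max_left _ _))

theorem foldl_max_head_le (u : List Int) (y : Int) : y ≤ u.foldl max y := by
  induction u generalizing y with
  | nil => exact le_rfl
  | cons a t ih => exact le_trans (le_max_left _ _) (ih (max y a))

-- ===== VERDICT (by name: the statement is the Claim_ definition above) =====
theorem ligne_a_modifier_spec : Claim_equal_ligne_a_modifier := by
  intro tableau _
  unfold Spec_ligne_a_modifier
  cases tableau with
  | nil => rfl
  | cons b t =>
      have hmem : (t.map bin_to_int).foldl max (bin_to_int b)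
          ∈ bin_to_int b :: t.map bin_to_int := foldl_max_mem _ _
      have halt : ligne_a_modifier_alt (b :: t)
          = ((firstIdx (bin_to_int b :: t.map bin_to_int)
              ((t.map bin_to_int).foldl max (bin_to_int b)) : Nat) : Int) := by
        have h1 : PySem.List.max? ((b :: t).map bin_to_int) (fun y => y)
            = some ((t.map bin_to_int).foldl max (bin_to_int b)) := by
          rw [List.map_cons, PySem.List.max?_id_cons]
        have h2 : PySem.List.index? ((b :: t).map bin_to_int)
              ((t.map bin_to_int).foldl max (bin_to_int b))
            = some (firstIdx (bin_to_int b :: t.map bin_to_int)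
                ((t.map bin_to_int).foldl max (bin_to_int b))) := by
          rw [List.map_cons]
          exact index?_eq_firstIdx _ _ hmem
        unfold ligne_a_modifier_alt
        rw [if_neg (List.cons_ne_nil b t)]
        show (match PySem.List.max? ((b :: t).map bin_to_int) (fun y => y) with
              | some m =>
                  match PySem.List.index? ((b :: t).map bin_to_int) m with
                  | some j => (j : Int)
                  | none => 0
              | none => 0) = _
        rw [h1]
        show (match PySem.List.index? ((b :: t).map bin_to_int)
                ((t.map bin_to_int).foldl max (bin_to_int b)) with
              | some j => (j : Int)
              | none => 0) = _
        rw [h2]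
      rw [halt, ligne_a_eq_auxScan, List.map_cons, auxScan_spec]
      by_cases h : (0 : Int) < (t.map bin_to_int).foldl max (bin_to_int b)
      · rw [if_pos h]
        simp
      · rw [if_neg h]
        have hb := bin_to_int_nonneg b
        have hm0 : 0 ≤ (t.map bin_to_int).foldl max (bin_to_int b) :=
          foldl_max_nonneg _ _ hb
        have hbm : bin_to_int b = (t.map bin_to_int).foldl max (bin_to_int b) := by
          have := foldl_max_head_le (t.map bin_to_int) (bin_to_int b)
          omega
        rw [show firstIdx (bin_to_int b :: t.map bin_to_int)
              ((t.map bin_to_int).foldl max (bin_to_int b)) = 0 by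
            simp only [firstIdx]
            rw [if_pos hbm]]
        simp
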